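-- pv_equiv track=rewrite | github.com/MSheshera/nary_universal_schema | pre_process/pre_proc_ms27k.py | swap_labs_ents
-- ===== SOURCE A (Python) =====
-- def swap_labs_ents(sent_toks, sent_labs):
--     """
--     Swap the entity labels into the sentence and get the entities out of the
--     sentence.
--     :param sent_toks: list(str)
--     :param sent_labs: list(str)
--     :return:
--     """
--     assert(len(sent_toks) == len(sent_labs))
--     ent_swapped_sent, sent_ents = [], []
--     cur_lab = ''
--     # Fix the predicted labels for obvious mistakes instead of trying to crazily
--     # handle for it below. Fix stray I-tags without B-tags.
--     inlab = False
--     for i, lab in enumerate(sent_labs):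
--         if lab[0] == 'O':
--             inlab = False
--         if lab[0] == 'B':
--             inlab = True
--         if lab[0] == 'I' and inlab == True:
--             continue
--         elif lab[0] == 'I' and inlab == False:
--             sent_labs[i] = 'B' + lab[1:]
--             inlab = True
--
--     for tok, lab in zip(sent_toks, sent_labs):
--         if lab == 'O':
--             ent_swapped_sent.append(tok)
--         # You saw a beginning, so add ent to the ents and place label into
--         # sentence.
--         elif lab[0] == 'B':
--             cur_lab = lab[2:]
--             ent_swapped_sent.append(cur_lab + '_netag')
--             sent_ents.append(tok)
--         # You see a "in", if its the same current label concat it with the B ent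
--         # token and skip any addition to the sentence.
--         elif lab[0] == 'I' and lab[2:] == cur_lab:
--             sent_ents[-1] = (sent_ents[-1] + ' ' + tok).strip()
--     return ent_swapped_sent, sent_ents
-- ===== SOURCE B (Python) =====
-- def swap_labs_ents(sent_toks, sent_labs):
--     """
--     Swap the entity labels into the sentence and get the entities out of the
--     sentence. Single pass over zip(sent_toks, sent_labs): the stray-I fix-up
--     is folded into the main transformation (sent_labs is still patched in
--     place when a stray I-tag is promoted to a B-tag, like the original).
--     :param sent_toks: list(str)
--     :param sent_labs: list(str)
--     :return:
--     """
--     assert(len(sent_toks) == len(sent_labs))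
--     ent_swapped_sent, sent_ents = [], []
--     inlab = False
--     cur_lab = ''
--     for i, (tok, lab) in enumerate(zip(sent_toks, sent_labs)):
--         c = lab[0]
--         if c == 'O':
--             inlab = False
--             if lab == 'O':
--                 ent_swapped_sent.append(tok)
--         elif c == 'B':
--             inlab = True
--             cur_lab = lab[2:]
--             ent_swapped_sent.append(cur_lab + '_netag')
--             sent_ents.append(tok)
--         elif c == 'I':
--             if inlab:
--                 if lab[2:] == cur_lab:
--                     sent_ents[-1] = (sent_ents[-1] + ' ' + tok).strip()
--             else:
--                 # stray I without a B: promote it, as the original's fix-up pass does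
--                 sent_labs[i] = 'B' + lab[1:]
--                 inlab = True
--                 cur_lab = lab[2:]
--                 ent_swapped_sent.append(cur_lab + '_netag')
--                 sent_ents.append(tok)
--     return ent_swapped_sent, sent_ents
-- ===== Notes on version B (the rewrite author's own statement) =====
-- stated objective: alternative
-- what changed: The separate label-fixing pass followed by a second swap pass is fused into one pass over zip(sent_toks, sent_labs) that maintains inlab and cur_lab together and promotes stray I-tags on the fly.
import Mathlib
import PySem

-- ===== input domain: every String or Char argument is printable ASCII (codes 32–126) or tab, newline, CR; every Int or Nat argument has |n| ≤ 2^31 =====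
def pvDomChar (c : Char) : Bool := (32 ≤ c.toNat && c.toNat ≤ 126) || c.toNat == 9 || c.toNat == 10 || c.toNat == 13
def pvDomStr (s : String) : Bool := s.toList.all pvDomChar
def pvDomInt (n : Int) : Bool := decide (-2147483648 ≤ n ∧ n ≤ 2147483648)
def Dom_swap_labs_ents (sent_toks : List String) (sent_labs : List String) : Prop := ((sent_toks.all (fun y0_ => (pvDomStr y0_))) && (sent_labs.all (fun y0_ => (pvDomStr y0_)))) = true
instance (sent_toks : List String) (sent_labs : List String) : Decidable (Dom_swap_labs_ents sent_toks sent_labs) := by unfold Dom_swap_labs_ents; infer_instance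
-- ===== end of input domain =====

-- B fuses A's label-fixing pass and swap pass into one pass over the zipped lists (same return value; both
-- Pythons also patch stray I-tags in sent_labs in place identically — the theorems here are about the return value).


-- Shared helper for the single Python statement `sent_ents[-1] = (sent_ents[-1] + ' ' + tok).strip()`
-- (identical in A and B; exact, PySem.Chars.strip is Python str.strip). ents = [] is Python's IndexError,
-- unreachable inside Pre_; the helper then leaves ents unchanged.
def pvConcatLast (ents : List String) (tok : String) : List String :=
  match ents.getLast? with
  | none => ents
  | some last => ents.dropLast ++ [String.ofList (PySem.Chars.strip (last.toList ++ ' ' :: tok.toList))]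

-- ===== PORT A =====
-- first loop of A: fix stray I-tags (`sent_labs[i] = 'B' + lab[1:]`), threading inlab; labels as char lists
def pvFixLabs : List (List Char) → Bool → List (List Char)
  | [], _ => []
  | lab :: rest, inlab =>
    let inlab1 := if PySem.List.pyGet? lab 0 = some 'O' then false else inlab
    let inlab2 := if PySem.List.pyGet? lab 0 = some 'B' then true else inlab1
    if PySem.List.pyGet? lab 0 = some 'I' ∧ inlab2 = true then
      lab :: pvFixLabs rest inlab2
    else if PySem.List.pyGet? lab 0 = some 'I' ∧ inlab2 = false then
      ('B' :: PySem.List.slice lab (some 1) none) :: pvFixLabs rest true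
    else
      lab :: pvFixLabs rest inlab2

-- second loop of A over zip(sent_toks, fixed sent_labs), threading cur_lab and the two output lists
def pvSwapPass : List (String × List Char) → List Char → List String → List String → List String × List String
  | [], _, sent, ents => (sent, ents)
  | (tok, lab) :: rest, cur, sent, ents =>
    if lab = ['O'] then
      pvSwapPass rest cur (sent ++ [tok]) ents
    else if PySem.List.pyGet? lab 0 = some 'B' then
      let cur' := PySem.List.slice lab (some 2) none
      pvSwapPass rest cur' (sent ++ [String.ofList (cur' ++ "_netag".toList)]) (ents ++ [tok])
    else if PySem.List.pyGet? lab 0 = some 'I' ∧ PySem.List.slice lab (some 2) none = cur then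
      pvSwapPass rest cur sent (pvConcatLast ents tok)
    else
      pvSwapPass rest cur sent ents

def swap_labs_ents (sent_toks : List String) (sent_labs : List String) : List String × List String :=
  pvSwapPass (sent_toks.zip (pvFixLabs (sent_labs.map (·.toList)) false)) [] [] []

-- ===== PORT B =====
-- B's single loop over zip(sent_toks, sent_labs), threading inlab, cur_lab and the two output lists
def pvOnePass : List (String × List Char) → Bool → List Char → List String → List String → List String × List String
  | [], _, _, sent, ents => (sent, ents)
  | (tok, lab) :: rest, inlab, cur, sent, ents =>
    if PySem.List.pyGet? lab 0 = some 'O' then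
      if lab = ['O'] then pvOnePass rest false cur (sent ++ [tok]) ents
      else pvOnePass rest false cur sent ents
    else if PySem.List.pyGet? lab 0 = some 'B' then
      let t := PySem.List.slice lab (some 2) none
      pvOnePass rest true t (sent ++ [String.ofList (t ++ "_netag".toList)]) (ents ++ [tok])
    else if PySem.List.pyGet? lab 0 = some 'I' then
      if inlab then
        if PySem.List.slice lab (some 2) none = cur then
          pvOnePass rest true cur sent (pvConcatLast ents tok)
        else pvOnePass rest true cur sent ents
      else
        let t := PySem.List.slice lab (some 2) none
        pvOnePass rest true t (sent ++ [String.ofList (t ++ "_netag".toList)]) (ents ++ [tok])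
    else pvOnePass rest inlab cur sent ents

def swap_labs_ents_alt (sent_toks : List String) (sent_labs : List String) : List String × List String :=
  pvOnePass (sent_toks.zip (sent_labs.map (·.toList))) false [] [] []

-- ===== PRECONDITION & SPEC =====
-- Exactly where Python A returns: equal lengths (else AssertionError) and no empty label (else IndexError at lab[0]).
def Pre_swap_labs_ents (sent_toks : List String) (sent_labs : List String) : Prop :=
  sent_toks.length = sent_labs.length ∧ ∀ l ∈ sent_labs, l ≠ ""
instance (sent_toks : List String) (sent_labs : List String) : Decidable (Pre_swap_labs_ents sent_toks sent_labs) := by unfold Pre_swap_labs_ents; infer_instance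

def pvWitness_swap_labs_ents : List String × List String :=
  (["Obama", "was", "elected", "in", "New", "York"], ["B-per", "O", "O", "O", "B-loc", "I-loc"])

def Spec_swap_labs_ents (sent_toks : List String) (sent_labs : List String) (out : List String × List String) : Prop := out = swap_labs_ents_alt sent_toks sent_labs
instance (sent_toks : List String) (sent_labs : List String) (out : List String × List String) : Decidable (Spec_swap_labs_ents sent_toks sent_labs out) := by unfold Spec_swap_labs_ents; infer_instance

-- ===== CLAIM (what is proved, stated in full; the proofs are below) =====
def Claim_equal_swap_labs_ents : Prop := ∀ (sent_toks : List String) (sent_labs : List String), Dom_swap_labs_ents sent_toks sent_labs → Pre_swap_labs_ents sent_toks sent_labs → Spec_swap_labs_ents sent_toks sent_labs (swap_labs_ents sent_toks sent_labs)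

-- ===== LEMMAS AND PROOFS =====

-- Fusion lemma: A's second pass on the fixed labels equals B's single pass, for every inlab/cur/accumulators.
lemma pvFuse (toks : List String) (labs : List (List Char)) (inlab : Bool) (cur : List Char)
    (sent ents : List String) :
    pvSwapPass (toks.zip (pvFixLabs labs inlab)) cur sent ents
      = pvOnePass (toks.zip labs) inlab cur sent ents := by
  induction toks generalizing labs inlab cur sent ents with
  | nil => simp [pvSwapPass, pvOnePass]
  | cons tok toks ih =>
    cases labs with
    | nil => simp [pvFixLabs, pvSwapPass, pvOnePass]
    | cons lab rest =>
      cases lab with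
      | nil =>
        simp [pvFixLabs, pvSwapPass, pvOnePass, PySem.List.pyGet?, ih]
      | cons c cs =>
        by_cases hO : c = 'O'
        · subst hO
          by_cases hOO : (cs : List Char) = []
          · subst hOO
            simp [pvFixLabs, pvSwapPass, pvOnePass, ih]
          · simp [pvFixLabs, pvSwapPass, pvOnePass, hOO, ih]
        · by_cases hB : c = 'B'
          · subst hB
            simp [pvFixLabs, pvSwapPass, pvOnePass, ih]
          · by_cases hI : c = 'I'
            · subst hI
              have hslice1 : PySem.List.slice ('I' :: cs) (some 1) none = cs := by
                simpa using PySem.List.slice_from_natCast ('I' :: cs) 1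
              have hslice2 : PySem.List.slice ('B' :: cs) (some 2) none
                  = PySem.List.slice ('I' :: cs) (some 2) none := by
                rw [show ((2 : Int)) = ((2 : Nat) : Int) by norm_num,
                  PySem.List.slice_from_natCast, PySem.List.slice_from_natCast]
                rfl
              cases inlab with
              | true =>
                by_cases hcur : PySem.List.slice ('I' :: cs) (some 2) none = cur
                · simp [pvFixLabs, pvSwapPass, pvOnePass, hcur, ih]
                · simp [pvFixLabs, pvSwapPass, pvOnePass, hcur, ih]
              | false =>
                simp [pvFixLabs, pvSwapPass, pvOnePass,
                  hslice1, hslice2, ih]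
            · simp [pvFixLabs, pvSwapPass, pvOnePass,
                hO, hB, hI, ih]

-- ===== VERDICT (by name: the statement is the Claim_ definition above) =====
theorem swap_labs_ents_spec : Claim_equal_swap_labs_ents := by
  intro sent_toks sent_labs _ _
  unfold Spec_swap_labs_ents swap_labs_ents swap_labs_ents_alt
  exact pvFuse sent_toks (sent_labs.map (fun s => s.toList)) false [] [] []
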